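-- pv_equiv track=rewrite | github.com/gitaar9/synth_predictor | tests/test_patch_to_python.py | get_unequal_params
-- ===== SOURCE A (Python) =====
-- def get_unequal_params(patch_1, patch_2):
--     mistakes = []
--     for (patch_1_id, patch_1_param, patch_1_value), (patch_2_id, patch_2_param, patch_2_value) in zip(patch_1, patch_2):
--         if not patch_1_id == patch_2_id:
--             raise RuntimeError("Patch ids dont match")
--         if not patch_1_value == patch_2_value:
--             mistakes.append((patch_1_param, patch_1_value, patch_2_value))
--     return mistakes
-- ===== SOURCE B (Python) =====
-- def get_unequal_params(patch_1, patch_2):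
--     # Pass 1: validate ids only.
--     for (id_1, param_1, value_1), (id_2, param_2, value_2) in zip(patch_1, patch_2):
--         if id_1 != id_2:
--             raise RuntimeError("Patch ids dont match")
--     # Pass 2: ids all match, collect differing values in one comprehension.
--     return [(param, value_1, value_2)
--             for (_, param, value_1), (_, _, value_2) in zip(patch_1, patch_2)
--             if value_1 != value_2]
-- ===== Notes on version B (the rewrite author's own statement) =====
-- stated objective: alternative
-- what changed: A's single interleaved check-and-collect loop with a mutated accumulator is split into a validation-only pass followed by a list comprehension that collects differing values.
import Mathlib
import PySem

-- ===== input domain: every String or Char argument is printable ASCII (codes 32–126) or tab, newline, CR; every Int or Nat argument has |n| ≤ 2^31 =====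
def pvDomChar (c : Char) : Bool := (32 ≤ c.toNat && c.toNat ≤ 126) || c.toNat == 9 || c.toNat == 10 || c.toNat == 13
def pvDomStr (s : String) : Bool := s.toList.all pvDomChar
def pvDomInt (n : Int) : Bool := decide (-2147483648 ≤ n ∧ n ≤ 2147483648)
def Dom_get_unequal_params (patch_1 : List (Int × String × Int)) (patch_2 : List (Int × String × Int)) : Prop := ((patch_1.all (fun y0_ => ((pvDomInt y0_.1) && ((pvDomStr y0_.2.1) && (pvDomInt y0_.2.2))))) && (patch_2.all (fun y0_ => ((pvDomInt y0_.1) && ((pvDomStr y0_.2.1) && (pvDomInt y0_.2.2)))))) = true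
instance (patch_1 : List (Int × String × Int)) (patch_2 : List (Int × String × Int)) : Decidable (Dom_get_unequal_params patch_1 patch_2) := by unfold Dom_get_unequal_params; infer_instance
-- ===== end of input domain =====

-- B splits A's interleaved check-and-collect loop into a validate-only pass then a comprehension; return values proved equal on Pre_ (no id mismatch in the zipped prefix, where A raises RuntimeError).

-- ===== PORT A =====
-- A's loop: mistakes accumulator, early exit models the RuntimeError (unreached under Pre_)
def pvLoopA : List ((Int × String × Int) × (Int × String × Int)) → List (String × Int × Int) → List (String × Int × Int)
  | [], mistakes => mistakes
  | ((id1, p1, v1), (id2, _, v2)) :: rest, mistakes =>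
    if ¬ (id1 = id2) then []  -- raise RuntimeError("Patch ids dont match"); excluded by Pre_
    else if ¬ (v1 = v2) then pvLoopA rest (mistakes ++ [(p1, v1, v2)])
    else pvLoopA rest mistakes

def get_unequal_params (patch_1 : List (Int × String × Int)) (patch_2 : List (Int × String × Int)) : List (String × Int × Int) :=
  pvLoopA (List.zip patch_1 patch_2) []

-- ===== PORT B =====
-- B pass 1: validate ids only (false models the RuntimeError; unreached under Pre_)
def pvValidB : List ((Int × String × Int) × (Int × String × Int)) → Bool
  | [] => true
  | ((id1, _, _), (id2, _, _)) :: rest =>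
    if id1 ≠ id2 then false else pvValidB rest

def get_unequal_params_alt (patch_1 : List (Int × String × Int)) (patch_2 : List (Int × String × Int)) : List (String × Int × Int) :=
  if pvValidB (List.zip patch_1 patch_2) then
    -- pass 2: the comprehension
    (List.zip patch_1 patch_2).filterMap
      (fun x => if x.1.2.2 ≠ x.2.2.2 then some (x.1.2.1, x.1.2.2, x.2.2.2) else none)
  else []  -- raise RuntimeError("Patch ids dont match"); excluded by Pre_

-- ===== PRECONDITION & SPEC =====
-- Pre_ excludes exactly the inputs where A raises RuntimeError: some zipped pair has mismatching ids.
def Pre_get_unequal_params (patch_1 : List (Int × String × Int)) (patch_2 : List (Int × String × Int)) : Prop :=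
  ∀ x ∈ List.zip patch_1 patch_2, x.1.1 = x.2.1
instance (patch_1 : List (Int × String × Int)) (patch_2 : List (Int × String × Int)) : Decidable (Pre_get_unequal_params patch_1 patch_2) := by unfold Pre_get_unequal_params; infer_instance

def pvWitness_get_unequal_params : (List (Int × String × Int)) × (List (Int × String × Int)) :=
  ([(1, "cutoff", 3), (2, "res", 5)], [(1, "cutoff", 3), (2, "res", 7)])

def Spec_get_unequal_params (patch_1 : List (Int × String × Int)) (patch_2 : List (Int × String × Int)) (out : List (String × Int × Int)) : Prop := out = get_unequal_params_alt patch_1 patch_2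
instance (patch_1 : List (Int × String × Int)) (patch_2 : List (Int × String × Int)) (out : List (String × Int × Int)) : Decidable (Spec_get_unequal_params patch_1 patch_2 out) := by unfold Spec_get_unequal_params; infer_instance

-- ===== CLAIM (what is proved, stated in full; the proofs are below) =====
def Claim_equal_get_unequal_params : Prop := ∀ (patch_1 : List (Int × String × Int)) (patch_2 : List (Int × String × Int)), Dom_get_unequal_params patch_1 patch_2 → Pre_get_unequal_params patch_1 patch_2 → Spec_get_unequal_params patch_1 patch_2 (get_unequal_params patch_1 patch_2)

-- ===== LEMMAS AND PROOFS =====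
theorem pvLoopA_eq (l : List ((Int × String × Int) × (Int × String × Int)))
    (h : ∀ x ∈ l, x.1.1 = x.2.1) (acc : List (String × Int × Int)) :
    pvLoopA l acc = acc ++ l.filterMap
      (fun x => if x.1.2.2 ≠ x.2.2.2 then some (x.1.2.1, x.1.2.2, x.2.2.2) else none) := by
  induction l generalizing acc with
  | nil => simp [pvLoopA]
  | cons hd tl ih =>
    obtain ⟨⟨id1, p1, v1⟩, ⟨id2, p2, v2⟩⟩ := hd
    have hid : id1 = id2 := h _ (List.mem_cons_self)
    have htl : ∀ x ∈ tl, x.1.1 = x.2.1 := fun x hx => h x (List.mem_cons_of_mem _ hx)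
    by_cases hv : v1 = v2 <;>
      simp [pvLoopA, hid, hv, ih htl, List.filterMap_cons]

theorem pvValidB_eq (l : List ((Int × String × Int) × (Int × String × Int)))
    (h : ∀ x ∈ l, x.1.1 = x.2.1) : pvValidB l = true := by
  induction l with
  | nil => rfl
  | cons hd tl ih =>
    obtain ⟨⟨id1, p1, v1⟩, ⟨id2, p2, v2⟩⟩ := hd
    have hid : id1 = id2 := h _ (List.mem_cons_self)
    simp [pvValidB, hid, ih fun x hx => h x (List.mem_cons_of_mem _ hx)]

-- ===== VERDICT (by name: the statement is the Claim_ definition above) =====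
theorem get_unequal_params_spec : Claim_equal_get_unequal_params := by
  intro p1 p2 _ hpre
  unfold Spec_get_unequal_params get_unequal_params get_unequal_params_alt
  rw [pvValidB_eq _ hpre, pvLoopA_eq _ hpre]
  simp
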